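-- pv_equiv track=rewrite | github.com/chang/jrnl-server | jrnl_server/helpers.py | get_day_with_suffix
-- ===== SOURCE A (Python) =====
-- def get_day_with_suffix(day):
--     """
--     Returns:
--         (day, suffix): (TUPLE[STR, STR])
--     """
--     assert isinstance(day, int) and 0 < day <= 31
--     SUFFIXES = {
--         1: 'st',
--         2: 'nd',
--         3: 'rd',
--         4: 'th',
--         21: 'st',
--         22: 'nd',
--         23: 'rd',
--         24: 'th',
--         31: 'st',
--     }
--     suffix_day = day
--     while True:
--         if suffix_day in SUFFIXES:
--             suffix = SUFFIXES[suffix_day]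
--             return (str(day), suffix)
--         suffix_day -= 1
-- ===== SOURCE B (Python) =====
-- def get_day_with_suffix(day):
--     """
--     Returns:
--         (day, suffix): (TUPLE[STR, STR])
--     """
--     assert isinstance(day, int) and 0 < day <= 31
--     if 11 <= day % 100 <= 13:
--         suffix = 'th'
--     else:
--         suffix = {1: 'st', 2: 'nd', 3: 'rd'}.get(day % 10, 'th')
--     return (str(day), suffix)
-- ===== Notes on version B (the rewrite author's own statement) =====
-- stated objective: simpler
-- what changed: Replaces the SUFFIXES table and the decrement-until-hit while loop with a direct modular-arithmetic pick (11-13 -> 'th', else day % 10 chooses st/nd/rd/th).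
import Mathlib
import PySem

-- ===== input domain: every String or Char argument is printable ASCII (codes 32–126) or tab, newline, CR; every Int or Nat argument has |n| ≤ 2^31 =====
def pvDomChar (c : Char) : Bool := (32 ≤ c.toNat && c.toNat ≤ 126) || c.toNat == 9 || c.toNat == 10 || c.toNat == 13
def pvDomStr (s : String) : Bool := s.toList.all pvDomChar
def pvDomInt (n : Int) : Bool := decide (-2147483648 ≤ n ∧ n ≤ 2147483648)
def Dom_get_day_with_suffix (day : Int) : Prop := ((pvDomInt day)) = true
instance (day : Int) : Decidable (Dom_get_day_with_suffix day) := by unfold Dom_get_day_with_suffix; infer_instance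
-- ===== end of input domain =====

-- B replaces A's suffix table plus decrement loop with a direct modular-arithmetic pick (simpler).

-- ===== PORT A =====
-- A's SUFFIXES dict, built in insertion order.
def pvSuffixes : PySem.Dict Int String :=
  (((((((((PySem.Dict.empty).insert 1 "st").insert 2 "nd").insert 3 "rd").insert 4 "th").insert
      21 "st").insert 22 "nd").insert 23 "rd").insert 24 "th").insert 31 "st"

-- A's 'while True' decrement loop; fuel only makes the recursion total (inside Pre_ it always hits a key).
def pvALoop (day : Int) (suffix_day : Int) (fuel : Nat) : String × String :=
  match fuel with
  | 0 => ("", "")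
  | fuel + 1 =>
    match pvSuffixes.get? suffix_day with
    | some suffix => (PySem.Int.toStr day, suffix)
    | none => pvALoop day (suffix_day - 1) fuel

def get_day_with_suffix (day : Int) : String × String :=
  pvALoop day day 40

-- ===== PORT B =====
def get_day_with_suffix_alt (day : Int) : String × String :=
  let suffix :=
    if 11 ≤ PySem.Int.mod day 100 ∧ PySem.Int.mod day 100 ≤ 13 then "th"
    else ((((PySem.Dict.empty : PySem.Dict Int String).insert 1 "st").insert 2 "nd").insert 3 "rd").getD
          (PySem.Int.mod day 10) "th"
  (PySem.Int.toStr day, suffix)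

-- ===== PRECONDITION & SPEC =====
-- A's assert: it raises AssertionError unless 0 < day ≤ 31.
def Pre_get_day_with_suffix (day : Int) : Prop := 0 < day ∧ day ≤ 31
instance (day : Int) : Decidable (Pre_get_day_with_suffix day) := by unfold Pre_get_day_with_suffix; infer_instance
def pvWitness_get_day_with_suffix : Int := 17

def Spec_get_day_with_suffix (day : Int) (out : String × String) : Prop := out = get_day_with_suffix_alt day
instance (day : Int) (out : String × String) : Decidable (Spec_get_day_with_suffix day out) := by unfold Spec_get_day_with_suffix; infer_instance

-- ===== CLAIM (what is proved, stated in full; the proofs are below) =====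
def Claim_equal_get_day_with_suffix : Prop := ∀ (day : Int), Dom_get_day_with_suffix day → Pre_get_day_with_suffix day → Spec_get_day_with_suffix day (get_day_with_suffix day)

-- ===== LEMMAS AND PROOFS =====

-- ===== VERDICT (by name: the statement is the Claim_ definition above) =====
theorem get_day_with_suffix_spec : Claim_equal_get_day_with_suffix := by
  intro day _ hpre
  obtain ⟨h1, h2⟩ := hpre
  unfold Spec_get_day_with_suffix
  interval_cases day <;> decide
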